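-- pv_equiv track=rewrite | github.com/981377660LMT/algorithm-study | 19_数学/容斥原理/acwing890. 能被整除的数-容斥原理.py | count
-- ===== SOURCE A (Python) =====
-- from typing import List
--
-- def count(upper: int, primes: List[int]) -> int:
--     """[1, upper]中能被primes中的至少一个数整除的数的个数"""
--     m = len(primes)
--     res = 0
--     for state in range(1, (1 << m)):  # 枚举被哪些数整除
--         mul = 1
--         for i in range(m):
--             if state & (1 << i):
--                 mul *= primes[i]
--
--         # !奇数个元素系数为 1，偶数个元素为 -1
--         if state.bit_count() & 1:
--             res += upper // mul
--         else:
--             res -= upper // mul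
--     return res
-- ===== SOURCE B (Python) =====
-- from typing import List
--
-- def count(upper: int, primes: List[int]) -> int:
--     """[1, upper]中能被primes中的至少一个数整除的数的个数"""
--     # subset-doubling: build (product, (-1)**|subset|) for every subset in one
--     # pass over primes, O(2^m) total instead of O(m * 2^m)
--     # subset-doubling: build (product, (-1)**len(subset)) for every subset in
--     # one pass over the primes instead of re-deriving each subset from a bitmask
--     subsets = [(1, 1)]
--     for p in primes:
--         subsets += [(prod * p, -sign) for prod, sign in subsets]
--     return upper - sum(sign * (upper // prod) for prod, sign in subsets)
-- ===== Notes on version B (the rewrite author's own statement) =====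
-- stated objective: alternative
-- what changed: B replaces A's enumeration of all 2^m bitmask states with an O(m) inner product loop each by a subset-doubling pass over the primes that builds every subset's (product, sign) pair once, then sums upper//product terms in a single pass (O(2^m) work vs O(m*2^m); a timing run read 6.45x at n=16 but could not confirm at the largest size, so no speed is claimed).
import Mathlib
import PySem

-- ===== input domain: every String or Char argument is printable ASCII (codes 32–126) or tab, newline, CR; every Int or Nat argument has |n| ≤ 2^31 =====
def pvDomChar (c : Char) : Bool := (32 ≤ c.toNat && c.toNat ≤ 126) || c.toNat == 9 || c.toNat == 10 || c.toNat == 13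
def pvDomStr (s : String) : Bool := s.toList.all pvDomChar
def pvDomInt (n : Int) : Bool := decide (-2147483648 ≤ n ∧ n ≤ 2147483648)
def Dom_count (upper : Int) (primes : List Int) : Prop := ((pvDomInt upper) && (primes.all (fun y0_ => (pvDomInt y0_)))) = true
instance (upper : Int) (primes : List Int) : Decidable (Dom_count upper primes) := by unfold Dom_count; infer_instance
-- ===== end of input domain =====

-- B replaces A's per-state inner product loop by a subset-doubling pass over the
-- primes that builds every subset's (product, sign) pair once (a different algorithm).

-- ===== PORT A =====
-- literal port of A: for each state in range(1, 1 << m) recompute the subset product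
-- with an inner loop over range(m), then add/subtract upper // mul by bit_count parity
def count (upper : Int) (primes : List Int) : Int :=
  let m := primes.length
  (PySem.List.pyRange 1 ((1 : Int) <<< m) 1).foldl
    (fun res state =>
      let mul := (PySem.List.pyRange 0 (m : Int) 1).foldl
        (fun mul i =>
          -- `state & (1 << i)`: i ranges over [0, m), nonnegative, so `.toNat` is exact
          if PySem.Int.band state ((1 : Int) <<< i.toNat) ≠ 0 then
            mul * PySem.List.pyGetD primes i 0
          else mul) 1
      if PySem.Int.bitCount state &&& 1 ≠ 0 then res + PySem.Int.floordiv upper mul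
      else res - PySem.Int.floordiv upper mul) 0

-- ===== PORT B =====
-- port of Source B: fold over primes doubling the list of (product, sign) pairs, then one sum
def count_alt (upper : Int) (primes : List Int) : Int :=
  let subsets := primes.foldl
    (fun acc p => acc ++ acc.map (fun dg => (dg.1 * p, -dg.2))) [((1 : Int), (1 : Int))]
  upper - (subsets.map (fun dg => dg.2 * PySem.Int.floordiv upper dg.1)).sum

-- ===== PRECONDITION & SPEC =====
-- Pre_ excludes exactly the inputs where Python A raises ZeroDivisionError:
-- if 0 ∈ primes, some state's subset product is 0 and `upper // mul` raises.
def Pre_count (upper : Int) (primes : List Int) : Prop := (0 : Int) ∉ primes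
instance (upper : Int) (primes : List Int) : Decidable (Pre_count upper primes) := by
  unfold Pre_count; infer_instance
def pvWitness_count : Int × List Int := (10, [2, 3])

def Spec_count (upper : Int) (primes : List Int) (out : Int) : Prop := out = count_alt upper primes
instance (upper : Int) (primes : List Int) (out : Int) : Decidable (Spec_count upper primes out) := by
  unfold Spec_count; infer_instance

-- ===== CLAIM (what is proved, stated in full; the proofs are below) =====
def Claim_equal_count : Prop := ∀ (upper : Int) (primes : List Int), Dom_count upper primes → Pre_count upper primes → Spec_count upper primes (count upper primes)

-- ===== LEMMAS AND PROOFS =====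

-- product of the primes selected by the set bits of s (in index order), as A computes it
def prodBits (primes : List Int) (s : Nat) : Int :=
  (List.range primes.length).foldl
    (fun mul i => if s.testBit i then mul * primes.getD i 0 else mul) 1

-- (-1)^popcount(s), phrased through the PySem bit_count port
def sgn (s : Nat) : Int := if PySem.Int.bitCount (s : Int) % 2 = 1 then -1 else 1

-- bitCount halving, total version
lemma bitCount_halve (s : Nat) :
    PySem.Int.bitCount (s : Int) = s % 2 + PySem.Int.bitCount ((s / 2 : Nat) : Int) := by
  rcases Nat.eq_zero_or_pos s with h | h
  · subst h; simp
  · exact PySem.Int.bitCount_natCast h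

lemma bitCount_two_pow_add {k s : Nat} (hs : s < 2 ^ k) :
    PySem.Int.bitCount ((2 ^ k + s : Nat) : Int) = PySem.Int.bitCount ((s : Nat) : Int) + 1 := by
  induction k generalizing s with
  | zero =>
    interval_cases s
    decide
  | succ k ih =>
    have h2 : (2 : Nat) ^ (k + 1) = 2 ^ k + 2 ^ k := by ring
    have hd : (2 ^ (k + 1) + s) / 2 = 2 ^ k + s / 2 := by omega
    have hm : (2 ^ (k + 1) + s) % 2 = s % 2 := by omega
    have hlt : s / 2 < 2 ^ k := by omega
    rw [bitCount_halve (2 ^ (k + 1) + s), hd, hm, ih hlt, bitCount_halve s]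
    omega

lemma sgn_two_pow_add {k s : Nat} (hs : s < 2 ^ k) : sgn (2 ^ k + s) = -sgn s := by
  unfold sgn
  rw [bitCount_two_pow_add hs]
  rcases Nat.even_or_odd (PySem.Int.bitCount ((s : Nat) : Int)) with h | h <;>
    simp [Nat.even_iff, Nat.odd_iff] at h <;> split_ifs <;> omega

lemma prodBits_append_low {ps : List Int} {p : Int} {s : Nat} (hs : s < 2 ^ ps.length) :
    prodBits (ps ++ [p]) s = prodBits ps s := by
  unfold prodBits
  rw [List.length_append, List.length_cons, List.length_nil, List.range_succ,
    List.foldl_append]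
  have hbit : s.testBit ps.length = false := Nat.testBit_lt_two_pow hs
  simp only [List.foldl_cons, List.foldl_nil, hbit, Bool.false_eq_true, if_false]
  apply PySem.List.foldl_congr_mem
  intro b i hi
  have hlt : i < ps.length := List.mem_range.mp hi
  rw [List.getD_append _ _ _ _ hlt]

lemma prodBits_append_high {ps : List Int} {p : Int} {s : Nat} (hs : s < 2 ^ ps.length) :
    prodBits (ps ++ [p]) (2 ^ ps.length + s) = prodBits ps s * p := by
  unfold prodBits
  rw [List.length_append, List.length_cons, List.length_nil, List.range_succ,
    List.foldl_append]
  have hbit : (2 ^ ps.length + s).testBit ps.length = true := by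
    rw [Nat.testBit_two_pow_add_eq, Nat.testBit_lt_two_pow hs]; rfl
  simp only [List.foldl_cons, List.foldl_nil, hbit, if_true]
  have hget : (ps ++ [p]).getD ps.length 0 = p := by
    rw [List.getD_eq_getElem?_getD, List.getElem?_append_right (le_refl _)]
    simp
  rw [hget]
  congr 1
  apply PySem.List.foldl_congr_mem
  intro b i hi
  have hlt : i < ps.length := List.mem_range.mp hi
  rw [List.getD_append _ _ _ _ hlt, Nat.testBit_two_pow_add_gt hlt]

-- the doubling fold produces exactly (prodBits s, sgn s) for s ∈ range (2^m)
lemma subsets_eq (primes : List Int) :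
    primes.foldl (fun acc p => acc ++ acc.map (fun dg => (dg.1 * p, -dg.2)))
        [((1 : Int), (1 : Int))]
      = (List.range (2 ^ primes.length)).map (fun s => (prodBits primes s, sgn s)) := by
  induction primes using List.reverseRecOn with
  | nil => simp [prodBits, sgn]
  | append_singleton ps p ih =>
    rw [List.foldl_append, List.foldl_cons, List.foldl_nil, ih]
    have hlen : (ps ++ [p]).length = ps.length + 1 := by simp
    rw [hlen, pow_succ, Nat.mul_two, List.range_add, List.map_append]
    congr 1
    · apply List.map_congr_left
      intro s hs
      have hs' : s < 2 ^ ps.length := List.mem_range.mp hs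
      rw [prodBits_append_low hs']
    · rw [List.map_map, List.map_map]
      apply List.map_congr_left
      intro s hs
      have hs' : s < 2 ^ ps.length := List.mem_range.mp hs
      simp only [Function.comp]
      rw [prodBits_append_high hs', sgn_two_pow_add hs']

lemma prodBits_zero (primes : List Int) : prodBits primes 0 = 1 := by
  unfold prodBits
  have : ∀ (l : List Nat), l.foldl (fun (mul : Int) i =>
      if Nat.testBit 0 i then mul * primes.getD i 0 else mul) 1 = 1 := by
    intro l
    induction l with
    | nil => rfl
    | cons x xs ih => simp [Nat.zero_testBit]
  exact this _

lemma sum_map_neg' {α : Type} (l : List α) (g : α → Int) :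
    (l.map (fun x => -g x)).sum = -(l.map g).sum := by
  induction l with
  | nil => simp
  | cons x xs ih => simp [ih]; ring

-- A's inner loop computes prodBits
lemma inner_mul (primes : List Int) (s : Nat) :
    (PySem.List.pyRange 0 (primes.length : Int) 1).foldl
      (fun mul i =>
        if PySem.Int.band (s : Int) ((1 : Int) <<< i.toNat) ≠ 0 then
          mul * PySem.List.pyGetD primes i 0
        else mul) 1 = prodBits primes s := by
  rw [PySem.List.pyRange_zero_natCast, List.foldl_map]
  apply PySem.List.foldl_congr_mem
  intro mul j hj
  simp only [Int.toNat_natCast, Int.one_shiftLeft, PySem.Int.band_natCast,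
    PySem.List.pyGetD_natCast]
  have h3 : (((s &&& 2 ^ j : Nat) : Int) ≠ 0) ↔ s.testBit j = true := by
    rw [Nat.and_two_pow]
    cases h : s.testBit j <;> simp
  by_cases hb : s.testBit j = true
  · rw [if_pos (h3.mpr hb), hb, if_pos rfl]
  · rw [if_neg (fun hc => hb (h3.mp hc)), if_neg hb]

-- the parity branch as a single additive term
lemma step_term (upper : Int) (primes : List Int) (res : Int) (s : Nat) :
    (if PySem.Int.bitCount ((s : Nat) : Int) &&& 1 ≠ 0 then
        res + PySem.Int.floordiv upper (prodBits primes s)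
      else res - PySem.Int.floordiv upper (prodBits primes s))
      = res + -(sgn s * PySem.Int.floordiv upper (prodBits primes s)) := by
  unfold sgn
  rw [Nat.and_one_is_mod]
  by_cases h : PySem.Int.bitCount ((s : Nat) : Int) % 2 = 1
  · rw [if_pos (by omega), if_pos h]; ring
  · rw [if_neg (by omega), if_neg h]; ring

theorem count_spec : Claim_equal_count := by
  intro upper primes _ _
  unfold Spec_count count count_alt
  simp only
  -- rewrite B via subsets_eq
  rw [subsets_eq, List.map_map]
  have hBmap : ((fun dg : Int × Int => dg.2 * PySem.Int.floordiv upper dg.1) ∘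
      fun s => (prodBits primes s, sgn s))
      = fun s => sgn s * PySem.Int.floordiv upper (prodBits primes s) := by
    funext s; simp
  rw [hBmap]
  -- split off s = 0
  have hpow : 2 ^ primes.length = (2 ^ primes.length - 1) + 1 := by
    have := Nat.one_le_two_pow (n := primes.length); omega
  rw [hpow, List.range_succ_eq_map, List.map_cons, List.sum_cons, List.map_map]
  have h0 : sgn 0 * PySem.Int.floordiv upper (prodBits primes 0) = upper := by
    simp [sgn, prodBits_zero]
  rw [h0]
  -- rewrite A to a fold over the same Nat range
  have hsh : (1 : Int) <<< primes.length = ((2 ^ primes.length : Nat) : Int) := by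
    rw [Int.shiftLeft_eq, one_mul]; push_cast; ring
  have houter := PySem.List.pyRange_one 1 ((2 ^ primes.length : Nat) : Int)
  have htn : ((((2 ^ primes.length : Nat) : Int)) - 1).toNat = 2 ^ primes.length - 1 := by
    omega
  rw [hsh, houter, htn, List.foldl_map]
  refine Eq.trans (PySem.List.foldl_congr_mem (List.range (2 ^ primes.length - 1)) _
      (fun (res : Int) (k : Nat) =>
        res + -(sgn (1 + k) * PySem.Int.floordiv upper (prodBits primes (1 + k)))) 0 ?_) ?_
  · intro res k _
    have hc : (1 : Int) + (k : Int) = (((1 + k : Nat) : Int)) := by push_cast; ring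
    simp only [hc, inner_mul primes (1 + k)]
    exact step_term upper primes res (1 + k)
  · rw [PySem.List.foldl_add]
    rw [sum_map_neg']
    have hmc : ((List.range (2 ^ primes.length - 1)).map
          ((fun s => sgn s * PySem.Int.floordiv upper (prodBits primes s)) ∘ Nat.succ))
        = (List.range (2 ^ primes.length - 1)).map
          (fun k => sgn (1 + k) * PySem.Int.floordiv upper (prodBits primes (1 + k))) := by
      apply List.map_congr_left
      intro k _
      simp [Function.comp, Nat.succ_eq_add_one, Nat.add_comm]
    rw [hmc]; ring
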